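-- pv_equiv track=rewrite | github.com/fjguaita/codesignal | Arcade/The Core/27_magicalWell.py | magicalWell
-- ===== SOURCE A (Python) =====
-- def magicalWell(a, b, n):
--     o=0
--     while n>0:
--         o+=a*b
--         a+=1
--         b+=1
--         n-=1
--     return o
-- ===== SOURCE B (Python) =====
-- def magicalWell(a, b, n):
--     if n <= 0:
--         return 0
--     return n * a * b + (a + b) * (n * (n - 1) // 2) + (n - 1) * n * (2 * n - 1) // 6
-- ===== Notes on version B (the rewrite author's own statement) =====
-- stated objective: faster
-- what changed: Replaced the O(n) accumulation loop with the closed-form polynomial sum n*a*b + (a+b)*T(n-1) + sum of squares via n(n-1)(2n-1)/6.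
import Mathlib
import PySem

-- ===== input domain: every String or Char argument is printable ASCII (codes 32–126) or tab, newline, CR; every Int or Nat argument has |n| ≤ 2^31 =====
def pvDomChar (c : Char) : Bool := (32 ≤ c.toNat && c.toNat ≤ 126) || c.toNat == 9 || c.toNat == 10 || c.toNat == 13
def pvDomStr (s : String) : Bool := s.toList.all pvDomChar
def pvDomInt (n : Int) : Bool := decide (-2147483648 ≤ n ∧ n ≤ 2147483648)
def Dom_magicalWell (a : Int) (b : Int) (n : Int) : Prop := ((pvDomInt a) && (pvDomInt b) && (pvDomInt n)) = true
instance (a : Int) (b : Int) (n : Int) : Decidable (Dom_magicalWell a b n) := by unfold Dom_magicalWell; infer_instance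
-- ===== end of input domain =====

-- B replaces A's O(n) accumulation loop by the closed-form polynomial sum (objective: faster, asymptotic).

-- ===== PORT A =====
-- the while loop of A, state (o, a, b, n)
def magicalWellLoop (o : Int) (a : Int) (b : Int) (n : Int) : Int :=
  if n > 0 then magicalWellLoop (o + a * b) (a + 1) (b + 1) (n - 1) else o
termination_by n.toNat
decreasing_by omega

def magicalWell (a : Int) (b : Int) (n : Int) : Int :=
  magicalWellLoop 0 a b n

-- ===== PORT B =====
def magicalWell_alt (a : Int) (b : Int) (n : Int) : Int :=
  if n ≤ 0 then 0
  else n * a * b + (a + b) * (PySem.Int.floordiv (n * (n - 1)) 2)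
       + PySem.Int.floordiv ((n - 1) * n * (2 * n - 1)) 6

-- ===== PRECONDITION & SPEC =====
def Spec_magicalWell (a : Int) (b : Int) (n : Int) (out : Int) : Prop := out = magicalWell_alt a b n
instance (a : Int) (b : Int) (n : Int) (out : Int) : Decidable (Spec_magicalWell a b n out) := by unfold Spec_magicalWell; infer_instance

-- ===== CLAIM (what is proved, stated in full; the proofs are below) =====
def Claim_equal_magicalWell : Prop := ∀ (a : Int) (b : Int) (n : Int), Dom_magicalWell a b n → Spec_magicalWell a b n (magicalWell a b n)

-- ===== LEMMAS AND PROOFS =====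

-- 2 ∣ n*(n-1)
lemma pv_dvd_two (n : Int) : (2 : Int) ∣ n * (n - 1) := by
  rcases Int.even_mul_succ_self (n - 1) with ⟨c, hc⟩
  exact ⟨c, by linarith [hc]⟩

-- 6 ∣ (n-1)*n*(2n-1) for n ≥ 0, by induction on the Nat below n
lemma pv_dvd_six_nat (k : Nat) : (6 : Int) ∣ ((k : Int) - 1) * k * (2 * k - 1) := by
  induction k with
  | zero => decide
  | succ m ih =>
    rcases ih with ⟨c, hc⟩
    refine ⟨c + m * m, ?_⟩
    push_cast
    ring_nf
    ring_nf at hc ⊢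
    linarith [hc]

lemma pv_dvd_six (n : Int) (hn : 0 ≤ n) : (6 : Int) ∣ (n - 1) * n * (2 * n - 1) := by
  obtain ⟨k, rfl⟩ := Int.eq_ofNat_of_zero_le hn
  exact pv_dvd_six_nat k

-- the recurrence of the closed form: one loop step
lemma pv_alt_step (a b m : Int) (hm : 0 ≤ m) :
    magicalWell_alt a b (m + 1) = a * b + magicalWell_alt (a + 1) (b + 1) m := by
  rcases eq_or_lt_of_le hm with h0 | hpos
  · subst_vars
    simp [magicalWell_alt, PySem.Int.floordiv]
  · -- m ≥ 1 : both else-branches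
    rcases pv_dvd_two (m + 1) with ⟨t, ht⟩
    rcases pv_dvd_two m with ⟨t', ht'⟩
    rcases pv_dvd_six (m + 1) (by omega) with ⟨s, hs⟩
    rcases pv_dvd_six m (by omega) with ⟨s', hs'⟩
    have e1 : (m + 1) * (m + 1 - 1) = 2 * t := ht
    have e2 : m * (m - 1) = 2 * t' := ht'
    have e3 : (m + 1 - 1) * (m + 1) * (2 * (m + 1) - 1) = 6 * s := hs
    have e4 : (m - 1) * m * (2 * m - 1) = 6 * s' := hs'
    have f1 : PySem.Int.floordiv ((m + 1) * (m + 1 - 1)) 2 = t := by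
      rw [e1, PySem.Int.floordiv_eq_ediv_of_pos (by norm_num)]
      omega
    have f2 : PySem.Int.floordiv (m * (m - 1)) 2 = t' := by
      rw [e2, PySem.Int.floordiv_eq_ediv_of_pos (by norm_num)]
      omega
    have f3 : PySem.Int.floordiv ((m + 1 - 1) * (m + 1) * (2 * (m + 1) - 1)) 6 = s := by
      rw [e3, PySem.Int.floordiv_eq_ediv_of_pos (by norm_num)]
      omega
    have f4 : PySem.Int.floordiv ((m - 1) * m * (2 * m - 1)) 6 = s' := by
      rw [e4, PySem.Int.floordiv_eq_ediv_of_pos (by norm_num)]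
      omega
    have htt : t = t' + m := by nlinarith [e1, e2]
    have hss : s = s' + m * m := by nlinarith [e3, e4]
    have hA : ¬ (m + 1 ≤ (0 : Int)) := by omega
    have hB : ¬ (m ≤ (0 : Int)) := by omega
    simp only [magicalWell_alt, if_neg hA, if_neg hB, f1, f2, f3, f4]
    subst htt hss
    linear_combination e2

-- loop invariant: the loop returns o + closed form
lemma pv_loop_eq (k : Nat) : ∀ (o a b n : Int), n = k →
    magicalWellLoop o a b n = o + magicalWell_alt a b n := by
  induction k with
  | zero =>
    intro o a b n hn
    subst hn
    rw [magicalWellLoop]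
    simp [magicalWell_alt]
  | succ m ih =>
    intro o a b n hn
    subst hn
    rw [magicalWellLoop]
    have hpos : ((m + 1 : Nat) : Int) > 0 := by positivity
    rw [if_pos hpos]
    have hn' : ((m + 1 : Nat) : Int) - 1 = (m : Int) := by push_cast; ring
    rw [hn', ih (o + a * b) (a + 1) (b + 1) m rfl]
    have : ((m + 1 : Nat) : Int) = (m : Int) + 1 := by push_cast; ring
    rw [this, pv_alt_step a b m (by positivity)]
    ring

lemma pv_main (a b n : Int) : magicalWell a b n = magicalWell_alt a b n := by
  by_cases h : n ≤ 0
  · rw [magicalWell, magicalWellLoop, if_neg (by omega)]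
    simp [magicalWell_alt, h]
  · obtain ⟨k, rfl⟩ := Int.eq_ofNat_of_zero_le (by omega : (0:Int) ≤ n)
    have := pv_loop_eq k 0 a b k rfl
    rw [magicalWell, this]
    ring

-- ===== VERDICT (by name: the statement is the Claim_ definition above) =====
theorem magicalWell_spec : Claim_equal_magicalWell := by
  intro a b n _
  exact pv_main a b n
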